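-- pv_equiv track=rewrite | github.com/mafutajo/MUSALAAPP | lst_fction.py | filtrer_taches
-- ===== SOURCE A (Python) =====
-- def filtrer_taches(tasks):
--     sorted_tasks = sorted(
--         tasks, key=len, reverse=True
--     )  # Trier par longueur décroissante
--     filtered_tasks = []
--     for task in sorted_tasks:
--         if not any(
--             task in other_task and task != other_task for other_task in filtered_tasks
--         ):
--             filtered_tasks.append(task)
--     return filtered_tasks
-- ===== SOURCE B (Python) =====
-- def filtrer_taches(tasks):
--     # keep every task that is not a proper substring of some task in the list,
--     # then present the survivors longest-first (stable, like A's sort)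
--     survivors = [t for t in tasks if not any(t in u and t != u for u in tasks)]
--     return sorted(survivors, key=len, reverse=True)
-- ===== Notes on version B (the rewrite author's own statement) =====
-- stated objective: simpler
-- what changed: B replaces A's stateful accumulator loop (sort first, then test each task only against the already-kept tasks) by a pure comprehension testing each task against the whole input list, followed by one stable sort of the survivors.
import Mathlib
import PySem

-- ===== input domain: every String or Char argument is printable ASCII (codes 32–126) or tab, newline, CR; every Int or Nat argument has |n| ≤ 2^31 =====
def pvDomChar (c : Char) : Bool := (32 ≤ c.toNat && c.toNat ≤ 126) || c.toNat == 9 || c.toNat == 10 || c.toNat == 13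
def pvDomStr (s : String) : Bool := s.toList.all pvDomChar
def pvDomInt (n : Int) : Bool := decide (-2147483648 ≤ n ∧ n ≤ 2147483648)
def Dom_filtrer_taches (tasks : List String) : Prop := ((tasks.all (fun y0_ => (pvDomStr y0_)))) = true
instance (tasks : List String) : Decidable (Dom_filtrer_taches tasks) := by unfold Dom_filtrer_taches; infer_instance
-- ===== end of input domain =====

-- B replaces A's stateful accumulator loop by a pure comprehension against the whole list
-- followed by one stable sort of the survivors (objective: simpler; same asymptotic cost).

-- ===== PORT A =====
-- A: sort by length descending (stable), then keep each task unless it is a proper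
-- substring of an already-kept task.
def filtrer_taches (tasks : List String) : List String :=
  let sorted_tasks := PySem.List.sorted tasks (fun t => PySem.Str.len t) true
  sorted_tasks.foldl
    (fun filtered_tasks task =>
      if filtered_tasks.any (fun other_task => PySem.Str.isIn task other_task && task != other_task)
      then filtered_tasks
      else filtered_tasks ++ [task]) []

-- ===== PORT B =====
-- B: keep each task that is a proper substring of NO task of the whole list, then
-- stable-sort the survivors by length descending.
def filtrer_taches_alt (tasks : List String) : List String :=
  let survivors := tasks.filter (fun t => !(tasks.any (fun u => PySem.Str.isIn t u && t != u)))
  PySem.List.sorted survivors (fun t => PySem.Str.len t) true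

-- ===== PRECONDITION & SPEC =====
def Spec_filtrer_taches (tasks : List String) (out : List String) : Prop := out = filtrer_taches_alt tasks
instance (tasks : List String) (out : List String) : Decidable (Spec_filtrer_taches tasks out) := by unfold Spec_filtrer_taches; infer_instance

-- ===== CLAIM (what is proved, stated in full; the proofs are below) =====
def Claim_equal_filtrer_taches : Prop := ∀ (tasks : List String), Dom_filtrer_taches tasks → Spec_filtrer_taches tasks (filtrer_taches tasks)

-- ===== LEMMAS AND PROOFS =====

-- "t is a proper substring of u", the Prop behind the Bool test both programs use
def pvProper (t u : String) : Prop := t.toList <:+: u.toList ∧ t ≠ u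

theorem pvProper_of_bool {t u : String}
    (h : (PySem.Str.isIn t u && t != u) = true) : pvProper t u := by
  simp only [Bool.and_eq_true, bne_iff_ne] at h
  exact ⟨(PySem.Chars.isIn_iff_infix _ _).mp (by simpa [PySem.Str.isIn_eq] using h.1), h.2⟩

theorem pvProper_bool {t u : String} (h : pvProper t u) :
    (PySem.Str.isIn t u && t != u) = true := by
  simp only [Bool.and_eq_true, bne_iff_ne]
  exact ⟨by simpa [PySem.Str.isIn_eq] using (PySem.Chars.isIn_iff_infix _ _).mpr h.1, h.2⟩

theorem pvProper_length {t u : String} (h : pvProper t u) :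
    t.toList.length < u.toList.length := by
  rcases Nat.lt_or_ge t.toList.length u.toList.length with h' | h'
  · exact h'
  · exact absurd (String.toList_inj.mp
      (h.1.eq_of_length (Nat.le_antisymm h.1.length_le h'))) h.2

theorem pvProper_trans {s t u : String} (h1 : pvProper s t) (h2 : pvProper t u) :
    pvProper s u := by
  refine ⟨h1.1.trans h2.1, fun he => ?_⟩
  have l1 := pvProper_length h1
  have l2 := pvProper_length h2
  subst he
  omega

-- unfolding equations for insertBy on a cons cell
theorem insertBy_cons_pos {α : Type} (bef : α → α → Bool) (x y : α) (ys : List α)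
    (h : bef x y = true) : PySem.List.insertBy bef x (y :: ys) = x :: y :: ys := by
  simp [PySem.List.insertBy, h]

theorem insertBy_cons_neg {α : Type} (bef : α → α → Bool) (x y : α) (ys : List α)
    (h : bef x y = false) :
    PySem.List.insertBy bef x (y :: ys) = y :: PySem.List.insertBy bef x ys := by
  simp [PySem.List.insertBy, h]

-- insert x in front of a list all of whose elements x is "before"
theorem insertBy_cons_of_forall {α : Type} (bef : α → α → Bool) (x : α) (l : List α)
    (h : ∀ z ∈ l, bef x z = true) : PySem.List.insertBy bef x l = x :: l := by
  cases l with
  | nil => rfl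
  | cons y ys => exact insertBy_cons_pos bef x y ys (h y (by simp))

-- insertBy into a descending-pairwise list keeps it descending-pairwise
theorem insertBy_pairwise {α : Type} (key : α → Int) (x : α) (l : List α)
    (h : l.Pairwise (fun a b => key b ≤ key a)) :
    (PySem.List.insertBy (fun a b => decide (key b < key a)) x l).Pairwise
      (fun a b => key b ≤ key a) := by
  induction l with
  | nil => simp [PySem.List.insertBy]
  | cons y ys ih =>
    rcases List.pairwise_cons.mp h with ⟨hy, hys⟩
    by_cases hb : key y < key x
    · rw [insertBy_cons_pos _ _ _ _ (by simpa using hb)]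
      refine List.pairwise_cons.mpr ⟨?_, h⟩
      intro z hz
      rcases List.mem_cons.mp hz with rfl | hz
      · exact le_of_lt hb
      · exact le_trans (hy z hz) (le_of_lt hb)
    · rw [insertBy_cons_neg _ _ _ _ (by simpa using hb)]
      refine List.pairwise_cons.mpr ⟨?_, ih hys⟩
      intro z hz
      rcases (PySem.List.mem_insertBy _ _ _ _).mp hz with rfl | hz
      · omega
      · exact hy z hz

-- filtering commutes with a stable insertion into a descending list
theorem filter_insertBy {α : Type} (key : α → Int) (q : α → Bool) (x : α) (l : List α)
    (h : l.Pairwise (fun a b => key b ≤ key a)) :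
    (PySem.List.insertBy (fun a b => decide (key b < key a)) x l).filter q =
      if q x then PySem.List.insertBy (fun a b => decide (key b < key a)) x (l.filter q)
      else l.filter q := by
  induction l with
  | nil =>
    cases hq : q x with
    | true => simp [PySem.List.insertBy, hq]
    | false => simp [PySem.List.insertBy, hq]
  | cons y ys ih =>
    rcases List.pairwise_cons.mp h with ⟨hy, hys⟩
    by_cases hb : key y < key x
    · rw [insertBy_cons_pos _ _ _ _ (by simpa using hb)]
      cases hq : q x with
      | true =>
        have hall : ∀ z ∈ (y :: ys).filter q, (fun a b => decide (key b < key a)) x z = true := by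
          intro z hz
          have hz' : z ∈ y :: ys := List.mem_of_mem_filter hz
          rcases List.mem_cons.mp hz' with rfl | hz''
          · simpa using hb
          · have := hy z hz''
            simp only [decide_eq_true_eq]
            omega
        rw [insertBy_cons_of_forall _ x ((y :: ys).filter q) hall]
        simp [hq]
      | false => simp [hq]
    · rw [insertBy_cons_neg _ _ _ _ (by simpa using hb)]
      have ihy := ih hys
      have hbf : (decide (key y < key x)) = false := by simpa using hb
      cases hq : q x with
      | true =>
        cases hqy : q y with
        | true => simp [hqy, hq, ihy, insertBy_cons_neg, hbf]
        | false => simp [hqy, hq, ihy]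
      | false =>
        cases hqy : q y with
        | true => simp [hqy, hq, ihy]
        | false => simp [hqy, hq, ihy]

-- filtering commutes with the whole insertion-sort fold, given a sorted accumulator
theorem filter_foldl_insertBy {α : Type} (key : α → Int) (q : α → Bool) :
    ∀ (xs acc : List α), acc.Pairwise (fun a b => key b ≤ key a) →
    (xs.foldl (fun a x => PySem.List.insertBy (fun a b => decide (key b < key a)) x a) acc).filter q
      = (xs.filter q).foldl (fun a x => PySem.List.insertBy (fun a b => decide (key b < key a)) x a)
          (acc.filter q) := by
  intro xs
  induction xs with
  | nil => intro acc _; rfl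
  | cons x xs ih =>
    intro acc hacc
    simp only [List.foldl_cons]
    rw [ih _ (insertBy_pairwise key x acc hacc), filter_insertBy key q x acc hacc]
    cases hq : q x with
    | true => simp [hq]
    | false => simp [hq]

-- stable sort (reverse=True, key=len) commutes with filtering
theorem filter_sorted (q : String → Bool) (xs : List String) :
    (PySem.List.sorted xs (fun t => PySem.Str.len t) true).filter q =
      PySem.List.sorted (xs.filter q) (fun t => PySem.Str.len t) true := by
  rw [PySem.List.sorted_rev_eq_foldl_insertBy, PySem.List.sorted_rev_eq_foldl_insertBy]
  simpa using filter_foldl_insertBy (fun t => PySem.Str.len t) q xs [] (by simp)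

-- A's accumulator loop over the sorted list computes exactly the filter by
-- "proper substring of no task of the whole list"
theorem loop_eq_filter (tasks : List String) :
    ∀ (rest pre acc : List String),
    PySem.List.sorted tasks (fun t => PySem.Str.len t) true = pre ++ rest →
    acc = pre.filter (fun t => !(tasks.any (fun u => PySem.Str.isIn t u && t != u))) →
    (∀ s : String,
      (acc.any (fun u => PySem.Str.isIn s u && s != u)) = true ↔ ∃ u ∈ pre, pvProper s u) →
    rest.foldl
      (fun filtered_tasks task =>
        if filtered_tasks.any (fun other_task => PySem.Str.isIn task other_task && task != other_task)
        then filtered_tasks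
        else filtered_tasks ++ [task]) acc
      = acc ++ rest.filter (fun t => !(tasks.any (fun u => PySem.Str.isIn t u && t != u))) := by
  intro rest
  induction rest with
  | nil => intro pre acc _ _ _; simp
  | cons t rest ih =>
    intro pre acc hsplit hacc hinv
    have hmem_sorted : ∀ x, x ∈ pre ++ t :: rest ↔ x ∈ tasks := by
      intro x; rw [← hsplit]; exact PySem.List.mem_sorted tasks _ true x
    have hpair : (pre ++ t :: rest).Pairwise
        (fun a b => PySem.Str.len b ≤ PySem.Str.len a) := by
      rw [← hsplit]; exact PySem.List.sorted_pairwise_rev tasks _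
    -- the loop's accumulator test on t agrees with the whole-list test
    have hcond : (acc.any (fun u => PySem.Str.isIn t u && t != u)) = true ↔
        (tasks.any (fun u => PySem.Str.isIn t u && t != u)) = true := by
      constructor
      · intro h
        rcases (hinv t).mp h with ⟨u, hu, hp⟩
        exact List.any_eq_true.mpr
          ⟨u, (hmem_sorted u).mp (List.mem_append_left _ hu), pvProper_bool hp⟩
      · intro h
        rcases List.any_eq_true.mp h with ⟨u, hu, hb⟩
        have hp : pvProper t u := pvProper_of_bool hb
        have hlen : t.toList.length < u.toList.length := pvProper_length hp
        -- u is longer than t, so in the length-descending sorted list u lies in pre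
        have hupre : u ∈ pre := by
          rcases List.mem_append.mp ((hmem_sorted u).mpr hu) with h' | h'
          · exact h'
          · exfalso
            rcases List.mem_cons.mp h' with rfl | h''
            · exact hp.2 rfl
            · have h3 := (List.pairwise_append.mp hpair).2.1
              have h4 := (List.pairwise_cons.mp h3).1 u h''
              simp only [PySem.Str.len] at h4
              omega
        exact (hinv t).mpr ⟨u, hupre, hp⟩
    cases hc : acc.any (fun u => PySem.Str.isIn t u && t != u) with
    | true =>
      -- t is dropped by both programs
      have hq : (tasks.any (fun u => PySem.Str.isIn t u && t != u)) = true := hcond.mp hc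
      have hpt : ¬((!(tasks.any (fun u => PySem.Str.isIn t u && t != u))) = true) := by
        rw [hq]; decide
      have hacc' : acc = (pre ++ [t]).filter
          (fun t => !(tasks.any (fun u => PySem.Str.isIn t u && t != u))) := by
        rw [List.filter_append, List.filter_cons, if_neg hpt, List.filter_nil,
          List.append_nil, hacc]
      have hinv' : ∀ s : String,
          (acc.any (fun u => PySem.Str.isIn s u && s != u)) = true ↔
            ∃ u ∈ pre ++ [t], pvProper s u := by
        intro s
        rw [hinv s]
        constructor
        · rintro ⟨u, hu, hp⟩; exact ⟨u, List.mem_append_left _ hu, hp⟩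
        · rintro ⟨u, hu, hp⟩
          rcases List.mem_append.mp hu with h' | h'
          · exact ⟨u, h', hp⟩
          · -- u = t: chain through a witness dominating t in acc
            have hut : u = t := List.mem_singleton.mp h'
            subst hut
            rcases List.any_eq_true.mp hc with ⟨v, hv, hvb⟩
            have hvpre : v ∈ pre := by
              rw [hacc] at hv; exact List.mem_of_mem_filter hv
            exact ⟨v, hvpre, pvProper_trans hp (pvProper_of_bool hvb)⟩
      rw [List.foldl_cons, if_pos hc, ih (pre ++ [t]) acc (by simpa using hsplit) hacc' hinv',
        List.filter_cons, if_neg hpt]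
    | false =>
      -- t is kept by both programs
      have hq : (tasks.any (fun u => PySem.Str.isIn t u && t != u)) = false := by
        cases h' : tasks.any (fun u => PySem.Str.isIn t u && t != u) with
        | false => rfl
        | true =>
          have hx := hcond.mpr h'
          rw [hc] at hx
          exact Bool.noConfusion hx
      have hpt : ((!(tasks.any (fun u => PySem.Str.isIn t u && t != u))) = true) := by
        rw [hq]; decide
      have hacc' : acc ++ [t] = (pre ++ [t]).filter
          (fun t => !(tasks.any (fun u => PySem.Str.isIn t u && t != u))) := by
        rw [List.filter_append, List.filter_cons, if_pos hpt, List.filter_nil, hacc]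
      have hinv' : ∀ s : String,
          ((acc ++ [t]).any (fun u => PySem.Str.isIn s u && s != u)) = true ↔
            ∃ u ∈ pre ++ [t], pvProper s u := by
        intro s
        simp only [List.any_append, Bool.or_eq_true, List.any_cons, List.any_nil,
          Bool.or_false]
        rw [hinv s]
        constructor
        · rintro (⟨u, hu, hp⟩ | hb)
          · exact ⟨u, List.mem_append_left _ hu, hp⟩
          · exact ⟨t, List.mem_append_right _ (by simp), pvProper_of_bool hb⟩
        · rintro ⟨u, hu, hp⟩
          rcases List.mem_append.mp hu with h' | h'
          · exact Or.inl ⟨u, h', hp⟩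
          · have hut : u = t := List.mem_singleton.mp h'
            subst hut
            exact Or.inr (pvProper_bool hp)
      rw [List.foldl_cons, if_neg (by rw [hc]; decide),
        ih (pre ++ [t]) (acc ++ [t]) (by simpa using hsplit) hacc' hinv',
        List.filter_cons, if_pos hpt, List.append_assoc]
      rfl

-- ===== VERDICT (by name: the statement is the Claim_ definition above) =====
theorem filtrer_taches_spec : Claim_equal_filtrer_taches := by
  intro tasks _
  show filtrer_taches tasks = filtrer_taches_alt tasks
  have h := loop_eq_filter tasks
    (PySem.List.sorted tasks (fun t => PySem.Str.len t) true) [] [] rfl rfl (by simp)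
  simp only [List.nil_append] at h
  unfold filtrer_taches filtrer_taches_alt
  rw [h, filter_sorted]
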